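-- pv_equiv track=rewrite | github.com/Jaseci-Labs/jaseci | jaclang/utils/helpers.py | clip_code_section
-- ===== SOURCE A (Python) =====
-- def clip_code_section(s: str, target_line: int, line_range: int) -> str:
--     """Clip a section of code and highlight target line."""
--     lines = s.split("\n")
--     start = max(0, target_line - line_range - 1)
--     end = min(target_line + line_range, len(lines))
--
--     result = []
--     for i in range(start, end):
--         line = lines[i]
--         if i == target_line - 1:
--             line = "*" + line
--         result.append(line)
--     return "\n".join(result)
-- ===== SOURCE B (Python) =====
-- def clip_code_section(s: str, target_line: int, line_range: int) -> str:
--     """Clip a section of code and highlight target line.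
--
--     Works on the raw string via newline offsets: never materialises the list
--     of lines; the clipped window is two character offsets into s, and the
--     marker is a single insertion at the target line's offset.
--     """
--     nl = [j for j, ch in enumerate(s) if ch == "\n"]
--     n = len(nl) + 1  # number of lines
--     start = max(0, target_line - line_range - 1)
--     end = min(target_line + line_range, n)
--     if start >= end:
--         return ""
--     begin = 0 if start == 0 else nl[start - 1] + 1
--     finish = len(s) if end == n else nl[end - 1]
--     seg = s[begin:finish]
--     t = target_line - 1
--     if start <= t < end:
--         tb = 0 if t == 0 else nl[t - 1] + 1
--         seg = seg[: tb - begin] + "*" + seg[tb - begin :]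
--     return seg
-- ===== Notes on version B (the rewrite author's own statement) =====
-- stated objective: alternative
-- what changed: B never builds the list of lines: it records the newline offsets of the raw string in one scan, cuts the clipped window out with a single string slice between two of those offsets, and inserts the '*' marker once at the target line's offset, where A splits into a line list and loops over window indices joining (conditionally marked) lines.
import Mathlib
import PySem

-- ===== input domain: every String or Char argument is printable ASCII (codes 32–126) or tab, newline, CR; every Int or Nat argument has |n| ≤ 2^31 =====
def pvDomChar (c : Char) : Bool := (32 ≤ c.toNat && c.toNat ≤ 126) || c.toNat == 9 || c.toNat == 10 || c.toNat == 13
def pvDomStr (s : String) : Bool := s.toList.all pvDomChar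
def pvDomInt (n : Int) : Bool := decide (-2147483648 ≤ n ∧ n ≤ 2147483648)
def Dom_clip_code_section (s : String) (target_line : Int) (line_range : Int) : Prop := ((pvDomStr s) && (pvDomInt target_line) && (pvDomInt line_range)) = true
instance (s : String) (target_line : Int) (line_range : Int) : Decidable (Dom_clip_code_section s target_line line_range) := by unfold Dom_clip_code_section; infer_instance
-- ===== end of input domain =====

-- B replaces A's split-into-lines + index loop by a character-offset algorithm: it records the
-- newline positions of the raw string, cuts the window out with two string slices and inserts the
-- '*' marker once at the target line's offset; same result (objective: alternative).

-- ===== PORT A =====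
-- literal port of A: split, compute start/end, loop over range(start, end) appending
-- (marked) lines, join.  lines[i] is always in range here, so pyGetD's default is never used.
def clip_code_section (s : String) (target_line : Int) (line_range : Int) : String :=
  let lines := (PySem.Str.split? s "\n").getD []
  let start := max 0 (target_line - line_range - 1)
  let stop := min (target_line + line_range) (lines.length : Int)
  let result := (PySem.List.pyRange start stop 1).foldl
    (fun acc i =>
      let line := PySem.List.pyGetD lines i ""
      let line := if i = target_line - 1 then "*" ++ line else line
      acc ++ [line]) []
  PySem.Str.join "\n" result

-- ===== PORT B =====
-- literal port of Source B, on s.toList (Python string ops are char-list ops): the comprehension over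
-- enumerate(s) collecting newline positions, then the guard, two offsets, a slice and one
-- insertion.  nl[...] is always in range where evaluated, so pyGetD's default is never used.
def clip_code_section_alt (s : String) (target_line : Int) (line_range : Int) : String :=
  let cs := s.toList
  let nl : List Int := ((PySem.List.enumerate cs).filter (fun p => p.2 == '\n')).map (fun p => p.1)
  let n : Int := (nl.length : Int) + 1
  let start := max 0 (target_line - line_range - 1)
  let «end» := min (target_line + line_range) n
  if start ≥ «end» then "" else
    let begin_ : Int := if start = 0 then 0 else PySem.List.pyGetD nl (start - 1) 0 + 1
    let finish : Int := if «end» = n then (cs.length : Int) else PySem.List.pyGetD nl («end» - 1) 0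
    let seg := PySem.List.slice cs (some begin_) (some finish)
    let t := target_line - 1
    if start ≤ t ∧ t < «end» then
      let tb : Int := if t = 0 then 0 else PySem.List.pyGetD nl (t - 1) 0 + 1
      String.ofList (PySem.List.slice seg none (some (tb - begin_)) ++ '*' ::
                     PySem.List.slice seg (some (tb - begin_)) none)
    else String.ofList seg

-- ===== PRECONDITION & SPEC =====
def Spec_clip_code_section (s : String) (target_line : Int) (line_range : Int) (out : String) : Prop := out = clip_code_section_alt s target_line line_range
instance (s : String) (target_line : Int) (line_range : Int) (out : String) : Decidable (Spec_clip_code_section s target_line line_range out) := by unfold Spec_clip_code_section; infer_instance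

-- ===== CLAIM (what is proved, stated in full; the proofs are below) =====
def Claim_equal_clip_code_section : Prop := ∀ (s : String) (target_line : Int) (line_range : Int), Dom_clip_code_section s target_line line_range → Spec_clip_code_section s target_line line_range (clip_code_section s target_line line_range)

-- ===== LEMMAS AND PROOFS =====

-- ---------- proof-side vocabulary ----------

-- lines of a char list, split at '\n' (Python's s.split("\n")), as a plain structural recursion
def mySplit : List Char → List (List Char)
  | [] => [[]]
  | c :: rest =>
    match mySplit rest with
    | h :: t => if c = '\n' then [] :: h :: t else (c :: h) :: t
    | [] => [[c]]   -- unreachable: mySplit never returns []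

-- intercalate with a single newline, in recursive form
def ic : List (List Char) → List Char
  | [] => []
  | [l] => l
  | l :: ls => l ++ '\n' :: ic ls

-- total length in chars of the first i lines, counting one separator per line
def preLen (LS : List (List Char)) (i : Nat) : Nat := ((LS.take i).map (fun l => l.length + 1)).sum

-- newline positions of ic LS
def nlOf : List (List Char) → List Int
  | [] => []
  | [_] => []
  | l :: ls => (l.length : Int) :: (nlOf ls).map (· + ((l.length : Int) + 1))

lemma ic_cons₂ (l a : List Char) (b : List (List Char)) :
    ic (l :: a :: b) = l ++ '\n' :: ic (a :: b) := rfl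

lemma nlOf_cons₂ (l a : List Char) (b : List (List Char)) :
    nlOf (l :: a :: b) = (l.length : Int) :: (nlOf (a :: b)).map (· + ((l.length : Int) + 1)) := rfl

lemma mySplit_ne_nil (cs : List Char) : mySplit cs ≠ [] := by
  cases cs with
  | nil => simp [mySplit]
  | cons c rest =>
    obtain ⟨h', t', h⟩ := List.exists_cons_of_ne_nil (mySplit_ne_nil rest)
    simp only [mySplit, h]
    split <;> simp

lemma mySplit_cons (c : Char) (rest : List Char) (h' : List Char) (t' : List (List Char))
    (h : mySplit rest = h' :: t') :
    mySplit (c :: rest) = if c = '\n' then [] :: h' :: t' else (c :: h') :: t' := by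
  simp only [mySplit, h]

lemma mySplit_no_newline (cs : List Char) : ∀ l ∈ mySplit cs, '\n' ∉ l := by
  induction cs with
  | nil => simp [mySplit]
  | cons c rest ih =>
    obtain ⟨h', t', h⟩ := List.exists_cons_of_ne_nil (mySplit_ne_nil rest)
    intro l hl
    rw [mySplit_cons c rest h' t' h] at hl
    by_cases hc : c = '\n'
    · rw [if_pos hc] at hl
      rcases List.mem_cons.mp hl with rfl | hl2
      · simp
      · exact ih l (by rw [h]; exact hl2)
    · rw [if_neg hc] at hl
      rcases List.mem_cons.mp hl with rfl | hl2
      · intro hmem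
        rcases List.mem_cons.mp hmem with h1 | h1
        · exact hc h1.symm
        · exact ih h' (by rw [h]; simp) h1
      · exact ih l (by rw [h]; simp [hl2])

lemma ic_mySplit (cs : List Char) : ic (mySplit cs) = cs := by
  induction cs with
  | nil => simp [mySplit, ic]
  | cons c rest ih =>
    obtain ⟨h', t', h⟩ := List.exists_cons_of_ne_nil (mySplit_ne_nil rest)
    rw [mySplit_cons c rest h' t' h]
    rw [h] at ih
    by_cases hc : c = '\n'
    · subst hc
      rw [if_pos rfl]
      cases t' with
      | nil => simp [ic] at ih ⊢; simp [ih]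
      | cons a b => simp [ic] at ih ⊢; simp [ih]
    · rw [if_neg hc]
      cases t' with
      | nil => simp [ic] at ih ⊢; simp [ih]
      | cons a b => simp [ic] at ih ⊢; simp [ih]

-- the fuel-based splitOn.go, characterised for the one-char separator '\n'
lemma splitOn_go_newline : ∀ (fuel : Nat) (l cur : List Char) (acc : List (List Char)),
    l.length < fuel →
    PySem.Chars.splitOn.go ['\n'] fuel l cur acc =
      acc.reverse ++ (cur.reverse ++ (mySplit l).headI) :: (mySplit l).tail := by
  intro fuel
  induction fuel with
  | zero => intro l cur acc h; omega
  | succ f ih =>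
    intro l cur acc h
    cases l with
    | nil => simp [PySem.Chars.splitOn.go, mySplit]
    | cons c rest =>
      obtain ⟨h', t', hms⟩ := List.exists_cons_of_ne_nil (mySplit_ne_nil rest)
      rw [PySem.Chars.splitOn.go]
      by_cases hc : c = '\n'
      · subst hc
        rw [if_pos (by simp)]
        simp only [List.length_cons, List.length_nil, List.drop_succ_cons, List.drop_zero,
          Nat.zero_add]
        rw [ih rest [] (cur.reverse :: acc) (by simp at h; omega)]
        rw [mySplit_cons '\n' rest h' t' hms, if_pos rfl, hms]
        simp
      · rw [if_neg (by
          simp only [List.isPrefixOf, Bool.and_eq_true, beq_iff_eq]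
          intro hpre
          exact hc hpre.1.symm)]
        rw [ih rest (c :: cur) acc (by simp at h; omega)]
        rw [mySplit_cons c rest h' t' hms, if_neg hc, hms]
        simp

lemma splitOn_newline (cs : List Char) : PySem.Chars.splitOn cs ['\n'] = mySplit cs := by
  rw [PySem.Chars.splitOn, splitOn_go_newline (cs.length + 1) cs [] [] (by omega)]
  obtain ⟨h', t', hms⟩ := List.exists_cons_of_ne_nil (mySplit_ne_nil cs)
  rw [hms]
  simp

-- B's comprehension over enumerate equals nlOf of the line decomposition
def nlP (cs : List Char) (st : Int) : List Int :=
  ((PySem.List.enumerate cs st).filter (fun p => p.2 == '\n')).map (fun p => p.1)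

lemma nlP_cons (c : Char) (cs : List Char) (st : Int) :
    nlP (c :: cs) st = (if c = '\n' then [st] else []) ++ nlP cs (st + 1) := by
  simp only [nlP, PySem.List.enumerate_cons, List.filter_cons]
  by_cases hc : c = '\n' <;> simp [hc]

lemma nlP_shift (cs : List Char) : ∀ st : Int, nlP cs st = (nlP cs 0).map (· + st) := by
  induction cs with
  | nil => intro st; simp [nlP]
  | cons c rest ih =>
    intro st
    rw [nlP_cons, nlP_cons, ih (st + 1), ih (0 + 1)]
    by_cases hc : c = '\n' <;>
      simp [hc, List.map_map] <;>
      exact fun x _ => by ring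

lemma nlP_append_free (l cs : List Char) (hl : '\n' ∉ l) (st : Int) :
    nlP (l ++ cs) st = nlP cs (st + l.length) := by
  induction l generalizing st with
  | nil => simp
  | cons c rest ih =>
    simp only [List.cons_append]
    rw [nlP_cons, if_neg (by intro h; exact hl (by simp [h])), List.nil_append,
      ih (by intro h; exact hl (by simp [h])) (st + 1)]
    congr 1
    simp
    ring

lemma nlP_ic (LS : List (List Char)) (hnl : ∀ l ∈ LS, '\n' ∉ l) :
    nlP (ic LS) 0 = nlOf LS := by
  induction LS with
  | nil => simp [ic, nlP, nlOf]
  | cons l ls ih =>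
    cases ls with
    | nil =>
      simp only [ic, nlOf]
      have := nlP_append_free l [] (hnl l (by simp)) 0
      simpa using this
    | cons a b =>
      simp only [ic, nlOf]
      rw [nlP_append_free l _ (hnl l (by simp)) 0, nlP_cons, if_pos rfl]
      rw [nlP_shift _ (0 + (l.length:Int) + 1)]
      rw [ih (by intro x hx; exact hnl x (by simp [hx]))]
      simp

-- length / element / prefix-sum facts
lemma nlOf_length (LS : List (List Char)) : (nlOf LS).length = LS.length - 1 := by
  induction LS with
  | nil => simp [nlOf]
  | cons l ls ih =>
    cases ls with
    | nil => simp [nlOf]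
    | cons a b => rw [nlOf_cons₂]; simp at ih ⊢; omega

lemma preLen_zero (LS : List (List Char)) : preLen LS 0 = 0 := by simp [preLen]

lemma preLen_cons (l : List Char) (ls : List (List Char)) (i : Nat) :
    preLen (l :: ls) (i + 1) = (l.length + 1) + preLen ls i := by
  simp [preLen, List.take_succ_cons]

lemma preLen_add (LS : List (List Char)) (a k : Nat) :
    preLen LS (a + k) = preLen LS a + preLen (LS.drop a) k := by
  simp only [preLen]
  rw [List.take_add, List.map_append, List.sum_append]

lemma preLen_pos (LS : List (List Char)) {k : Nat} (hk : 1 ≤ k) (hne : LS ≠ []) :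
    1 ≤ preLen LS k := by
  cases LS with
  | nil => exact absurd rfl hne
  | cons l ls =>
    obtain ⟨k', rfl⟩ := Nat.exists_eq_add_of_le hk
    rw [Nat.add_comm 1 k', preLen_cons]; omega

lemma nlOf_getElem (LS : List (List Char)) : ∀ i (h : i < (nlOf LS).length),
    (nlOf LS)[i] = (preLen LS (i + 1) : Int) - 1 := by
  induction LS with
  | nil => intro i h; simp [nlOf] at h
  | cons l ls ih =>
    intro i h
    cases ls with
    | nil => simp [nlOf] at h
    | cons a b =>
      cases i with
      | zero => simp [nlOf_cons₂, preLen_cons, preLen_zero]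
      | succ i' =>
        simp only [nlOf_cons₂, List.getElem_cons_succ, List.getElem_map]
        rw [ih i' (by rw [nlOf_cons₂] at h; simp at h ⊢; omega)]
        have h1 : preLen (l :: a :: b) (i' + 1 + 1)
            = (l.length + 1) + preLen (a :: b) (i' + 1) := preLen_cons _ _ _
        omega

lemma ic_length (LS : List (List Char)) (hne : LS ≠ []) :
    (ic LS).length = preLen LS LS.length - 1 := by
  induction LS with
  | nil => exact absurd rfl hne
  | cons l ls ih =>
    cases ls with
    | nil => simp [ic, preLen_cons, preLen_zero]
    | cons a b =>
      rw [ic_cons₂]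
      have hlen := ih (by simp)
      have hcons : preLen (l :: a :: b) ((a :: b).length + 1)
          = (l.length + 1) + preLen (a :: b) ((a :: b).length) := preLen_cons _ _ _
      have hp : 1 ≤ preLen (a :: b) ((a :: b).length) := preLen_pos _ (by simp) (by simp)
      simp only [List.length_cons, List.length_append] at *
      omega

lemma ic_drop (LS : List (List Char)) : ∀ a, a < LS.length →
    (ic LS).drop (preLen LS a) = ic (LS.drop a) := by
  induction LS with
  | nil => intro a h; simp at h
  | cons l ls ih =>
    intro a h
    cases a with
    | zero => simp [preLen_zero]
    | succ a' =>
      have hls : ls ≠ [] := by intro hc; subst hc; simp at h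
      obtain ⟨x, y, hws⟩ := List.exists_cons_of_ne_nil hls
      subst hws
      rw [preLen_cons, ic_cons₂, List.drop_succ_cons]
      have hsplit : l ++ '\n' :: ic (x :: y) = (l ++ ['\n']) ++ ic (x :: y) := by simp
      have harr : l.length + 1 + preLen (x :: y) a' = (l ++ ['\n']).length + preLen (x :: y) a' := by
        simp
      rw [hsplit, harr, List.drop_length_add_append]
      exact ih a' (by simp at h ⊢; omega)

lemma ic_take (MS : List (List Char)) : ∀ k, 1 ≤ k → k ≤ MS.length →
    (ic MS).take (preLen MS k - 1) = ic (MS.take k) := by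
  induction MS with
  | nil => intro k h1 h2; simp at h2; omega
  | cons m ms ih =>
    intro k h1 h2
    obtain ⟨k', rfl⟩ := Nat.exists_eq_add_of_le h1
    rw [Nat.add_comm 1 k', preLen_cons]
    cases k' with
    | zero =>
      simp only [preLen_zero, Nat.add_zero, Nat.add_sub_cancel, List.take_succ_cons,
        List.take_zero]
      cases ms with
      | nil => simp [ic]
      | cons a b =>
        rw [ic_cons₂, List.take_append_of_le_length (by omega)]
        simp [ic]
    | succ k'' =>
      have hms : ms ≠ [] := by intro hc; subst hc; simp at h2
      obtain ⟨x, y, hws⟩ := List.exists_cons_of_ne_nil hms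
      subst hws
      have hpos : 1 ≤ preLen (x :: y) (k'' + 1) := preLen_pos _ (by omega) (by simp)
      rw [ic_cons₂]
      have harr : m.length + 1 + preLen (x :: y) (k'' + 1) - 1
          = (m ++ ['\n']).length + (preLen (x :: y) (k'' + 1) - 1) := by simp; omega
      have hsplit : m ++ '\n' :: ic (x :: y) = (m ++ ['\n']) ++ ic (x :: y) := by simp
      rw [hsplit, harr, List.take_length_add_append]
      rw [ih (k'' + 1) (by omega) (by simp at h2 ⊢; omega)]
      rw [show (m :: x :: y).take (k'' + 1 + 1) = m :: (x :: y).take (k'' + 1) from rfl]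
      obtain ⟨u, v, htk⟩ : ∃ u v, (x :: y).take (k'' + 1) = u :: v := ⟨x, y.take k'', rfl⟩
      rw [htk, ic_cons₂, ← htk]
      simp

-- inserting '*' at the char offset of line j marks line j
lemma ic_mark (W : List (List Char)) : ∀ j (h : j < W.length),
    (ic W).take (preLen W j) ++ '*' :: (ic W).drop (preLen W j)
      = ic (W.set j ('*' :: W[j])) := by
  induction W with
  | nil => intro j h; simp at h
  | cons w ws ih =>
    intro j h
    cases j with
    | zero =>
      simp only [preLen_zero, List.take_zero, List.drop_zero, List.nil_append,
        List.set_cons_zero, List.getElem_cons_zero]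
      cases ws with
      | nil => simp [ic]
      | cons a b => rw [ic_cons₂, ic_cons₂]; simp
    | succ j' =>
      have hws : ws ≠ [] := by intro hc; subst hc; simp at h
      obtain ⟨x, y, hws'⟩ := List.exists_cons_of_ne_nil hws
      subst hws'
      have hj : j' < (x :: y).length := by simp at h ⊢; omega
      rw [preLen_cons, ic_cons₂]
      have hsplit : w ++ '\n' :: ic (x :: y) = (w ++ ['\n']) ++ ic (x :: y) := by simp
      have harr : w.length + 1 + preLen (x :: y) j' = (w ++ ['\n']).length + preLen (x :: y) j' := by
        simp
      rw [hsplit, harr, List.take_length_add_append, List.drop_length_add_append]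
      rw [List.append_assoc]
      rw [show ((w ++ ['\n']) ++ (List.take (preLen (x :: y) j') (ic (x :: y)) ++ '*' :: List.drop (preLen (x :: y) j') (ic (x :: y)))
            = (w ++ ['\n']) ++ (List.take (preLen (x :: y) j') (ic (x :: y)) ++ '*' :: List.drop (preLen (x :: y) j') (ic (x :: y)))) from rfl]
      rw [ih j' hj]
      rw [show (w :: x :: y).set (j' + 1) ('*' :: (w :: x :: y)[j' + 1]) = w :: (x :: y).set j' ('*' :: (x :: y)[j']'hj) from by simp]
      obtain ⟨u, v, hq⟩ : ∃ u v, (x :: y).set j' ('*' :: (x :: y)[j']'hj) = u :: v := by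
        cases j' <;> exact ⟨_, _, rfl⟩
      rw [hq, ic_cons₂, ← hq]
      simp

-- A's loop output list equals the slice-plus-single-mark window (string level)
lemma mark_lists_eq (L : List String) (t a b : Int) (ha : 0 ≤ a) (hab : a ≤ b)
    (hb : b ≤ (L.length : Int) ∨ b = a) :
    (PySem.List.pyRange a b 1).map
      (fun i => if i = t - 1 then "*" ++ PySem.List.pyGetD L i "" else PySem.List.pyGetD L i "")
    = (let W := PySem.List.slice L (some a) (some b)
       let idx := t - 1 - a
       if 0 ≤ idx ∧ idx < (W.length : Int) then
         PySem.List.pySetD W idx ("*" ++ PySem.List.pyGetD W idx "")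
       else W) := by
  rcases eq_or_lt_of_le hab with heq | hlt
  · subst heq
    rw [PySem.List.pyRange_one_eq_nil le_rfl]
    lift a to Nat using ha with A
    rw [PySem.List.slice_natCast]
    simp
  · have hbl : b ≤ (L.length : Int) := by rcases hb with h | h <;> omega
    have hb0 : 0 ≤ b := le_trans ha hab
    lift a to Nat using ha with A
    lift b to Nat using hb0 with B
    have hAB : A < B := by exact_mod_cast hlt
    have hBL : B ≤ L.length := by exact_mod_cast hbl
    rw [PySem.List.slice_natCast, PySem.List.pyRange_one]
    set W := List.take (B - A) (List.drop A L) with hWdef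
    have hW : W.length = B - A := by simp [hWdef]; omega
    have htoNat : (((B : Int) - (A : Int)).toNat) = B - A := by omega
    rw [htoNat, List.map_map]
    have hWk : ∀ (m : Nat) (hm : m < B - A), W[m]'(by omega) = L[A + m]'(by omega) := by
      intro m hm
      simp [hWdef, List.getElem_take, List.getElem_drop]
    by_cases hC : 0 ≤ t - 1 - (A : Int) ∧ t - 1 - (A : Int) < (W.length : Int)
    · obtain ⟨hC1, hC2⟩ := hC
      have hCn : t - 1 - (A : Int) < ((B - A : Nat) : Int) := by rw [hW] at hC2; exact hC2
      rw [if_pos ⟨hC1, hC2⟩]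
      rw [PySem.List.pySetD_of_nonneg _ _ hC1]
      set j := (t - 1 - (A : Int)).toNat with hjdef
      have hjn : j < B - A := by omega
      have hvj : PySem.List.pyGetD W (t - 1 - (A : Int)) "" = L[A + j]'(by omega) := by
        rw [PySem.List.pyGetD_eq_getElem _ _ hC1 hC2]
        exact hWk j hjn
      apply List.ext_getElem
      · simp [hW]
      · intro k hk1 hk2
        have hkn : k < B - A := by
          simpa [hW] using hk2
        rw [List.getElem_set]
        simp only [List.getElem_map, List.getElem_range, Function.comp]
        rw [PySem.List.pyGetD_eq_getElem L _ (by omega) (by omega)]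
        have hcast : (((A : Int) + (k : Int)).toNat) = A + k := by omega
        simp only [hcast]
        by_cases hkj : j = k
        · subst hkj
          rw [if_pos (by omega : (A : Int) + (j : Int) = t - 1), if_pos rfl, hvj]
        · rw [if_neg (by omega : ¬ (A : Int) + (k : Int) = t - 1), if_neg hkj, hWk k hkn]
    · rw [if_neg hC]
      rw [hW] at hC
      apply List.ext_getElem
      · simp [hW]
      · intro k hk1 hk2
        have hkn : k < B - A := by simpa [hW] using hk2
        simp only [List.getElem_map, List.getElem_range, Function.comp]
        have hne : (A : Int) + (k : Int) ≠ t - 1 := by omega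
        rw [if_neg hne]
        rw [PySem.List.pyGetD_eq_getElem L _ (by omega) (by omega)]
        have hcast : (((A : Int) + (k : Int)).toNat) = A + k := by omega
        simp only [hcast]
        exact (hWk k hkn).symm

-- the common middle form: the clipped window of lines with the target line marked
def winMark (LS : List (List Char)) (t a e : Int) : List (List Char) :=
  let W := PySem.List.slice LS (some a) (some e)
  let idx := t - 1 - a
  if 0 ≤ idx ∧ idx < (W.length : Int) then
    PySem.List.pySetD W idx ('*' :: PySem.List.pyGetD W idx [])
  else W

lemma preLen_take (MS : List (List Char)) (k j : Nat) (h : j ≤ k) :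
    preLen (MS.take k) j = preLen MS j := by
  simp [preLen, List.take_take, Nat.min_eq_left h]

lemma join_eq_ic : ∀ xs : List (List Char), PySem.Chars.join ['\n'] xs = ic xs
  | [] => by simp [PySem.Chars.join, List.intercalate, ic]
  | [l] => by simp [PySem.Chars.join, List.intercalate, ic]
  | l :: a :: b => by
    rw [show PySem.Chars.join ['\n'] (l :: a :: b) = List.intercalate ['\n'] (l :: a :: b)
        from rfl]
    rw [show List.intercalate ['\n'] (l :: a :: b) = l ++ '\n' :: List.intercalate ['\n'] (a :: b)
        from by simp [List.intercalate, List.intersperse]]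
    rw [ic_cons₂, ← join_eq_ic (a :: b)]
    rfl

lemma split_toList (s : String) :
    ((PySem.Str.split? s "\n").getD []).map String.toList = mySplit s.toList := by
  have h := PySem.Str.split?_map s "\n"
  have hsep : ("\n" : String).toList = ['\n'] := by decide
  rw [hsep] at h
  have h2 : PySem.Chars.split? s.toList ['\n'] = some (mySplit s.toList) := by
    rw [PySem.Chars.split?, if_neg (by simp), splitOn_newline]
  rw [h2] at h
  cases hs : PySem.Str.split? s "\n" with
  | none => rw [hs] at h; simp at h
  | some L => rw [hs] at h; simpa using h

lemma strJoin_eq (parts : List String) :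
    PySem.Str.join "\n" parts = String.ofList (ic (parts.map String.toList)) := by
  rw [PySem.Str.join, show ("\n" : String).toList = ['\n'] from by decide, join_eq_ic]

lemma winMark_map (L : List String) (t a e : Int) (ha : 0 ≤ a) (hae : a ≤ e) :
    (let W := PySem.List.slice L (some a) (some e)
     let idx := t - 1 - a
     if 0 ≤ idx ∧ idx < (W.length : Int) then
       PySem.List.pySetD W idx ("*" ++ PySem.List.pyGetD W idx "")
     else W).map String.toList
    = winMark (L.map String.toList) t a e := by
  have he0 : 0 ≤ e := le_trans ha hae
  lift a to Nat using ha with A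
  lift e to Nat using he0 with E
  simp only [winMark, PySem.List.slice_natCast, ← List.map_drop, ← List.map_take]
  set W := List.take (E - A) (List.drop A L) with hWdef
  have hlen : ((W.map String.toList).length : Int) = (W.length : Int) := by simp
  rw [hlen]
  by_cases hC : 0 ≤ t - 1 - (A : Int) ∧ t - 1 - (A : Int) < (W.length : Int)
  · rw [if_pos hC, if_pos hC]
    obtain ⟨h1, h2⟩ := hC
    rw [PySem.List.pySetD_of_nonneg _ _ h1, PySem.List.pySetD_of_nonneg _ _ h1, List.map_set]
    congr 1
    rw [PySem.List.pyGetD_eq_getElem _ _ h1 h2,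
      PySem.List.pyGetD_eq_getElem _ _ h1 (by simpa using h2)]
    simp [String.toList_append]
  · rw [if_neg hC, if_neg hC]

lemma A_to_win (s : String) (t r : Int) :
    clip_code_section s t r
      = String.ofList (ic (winMark (mySplit s.toList) t (max 0 (t - r - 1))
          (max (max 0 (t - r - 1)) (min (t + r) ((mySplit s.toList).length : Int))))) := by
  unfold clip_code_section
  set L := (PySem.Str.split? s "\n").getD [] with hLdef
  have hmap : L.map String.toList = mySplit s.toList := split_toList s
  have hlen : (L.length : Int) = ((mySplit s.toList).length : Int) := by
    rw [← hmap]; simp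
  set a := max 0 (t - r - 1) with hadef
  set stop := min (t + r) (L.length : Int) with hstopdef
  simp only [PySem.List.foldl_append_singleton_eq_map, List.nil_append]
  have hrange : PySem.List.pyRange a stop 1 = PySem.List.pyRange a (max a stop) 1 := by
    rcases le_total a stop with h | h
    · rw [max_eq_right h]
    · rw [max_eq_left h, PySem.List.pyRange_one_eq_nil h, PySem.List.pyRange_one_eq_nil le_rfl]
  rw [hrange]
  rw [mark_lists_eq L t a (max a stop) (le_max_left 0 _) (le_max_left a stop)
    (by rcases le_total a stop with h | h
        · exact Or.inl (by rw [max_eq_right h]; exact min_le_right _ _)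
        · exact Or.inr (max_eq_left h))]
  rw [strJoin_eq]
  rw [winMark_map L t a (max a stop) (le_max_left 0 _) (le_max_left a stop)]
  rw [hmap, hstopdef, hlen]

lemma B_to_win (s : String) (t r : Int) :
    clip_code_section_alt s t r
      = String.ofList (ic (winMark (mySplit s.toList) t (max 0 (t - r - 1))
          (max (max 0 (t - r - 1)) (min (t + r) ((mySplit s.toList).length : Int))))) := by
  unfold clip_code_section_alt
  simp only []
  set cs := s.toList with hcs
  set LS := mySplit cs with hLS
  have hLSne : LS ≠ [] := mySplit_ne_nil cs
  have hicLS : ic LS = cs := ic_mySplit cs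
  have hnl : ((PySem.List.enumerate cs).filter (fun p => p.2 == '\n')).map (fun p => p.1)
      = nlOf LS := by
    calc ((PySem.List.enumerate cs).filter (fun p => p.2 == '\n')).map (fun p => p.1)
        = nlP cs 0 := rfl
      _ = nlP (ic LS) 0 := by rw [hicLS]
      _ = nlOf LS := nlP_ic LS (mySplit_no_newline cs)
  rw [hnl]
  set n := LS.length with hn
  have hn1 : 1 ≤ n := by
    cases hq : LS with
    | nil => exact absurd hq hLSne
    | cons x y => rw [hn, hq]; simp
  have hncast : ((nlOf LS).length : Int) + 1 = (n : Int) := by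
    rw [nlOf_length]; omega
  rw [hncast]
  set a := max 0 (t - r - 1) with hadef
  set e := min (t + r) (n : Int) with hedef
  have ha0 : 0 ≤ a := le_max_left 0 _
  by_cases hcase : a ≥ e
  · rw [if_pos hcase, max_eq_left hcase]
    lift a to Nat using ha0 with A
    have hW : PySem.List.slice LS (some ((A : Nat) : Int)) (some ((A : Nat) : Int)) = [] := by
      rw [PySem.List.slice_natCast]; simp
    simp only [winMark, hW]
    rw [if_neg (by rintro ⟨h1, h2⟩; simp at h2; omega)]
    rfl
  · rw [if_neg hcase, max_eq_right (by omega : a ≤ e)]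
    have hae : a < e := by omega
    have he0 : 0 ≤ e := by omega
    lift a to Nat using ha0 with A
    lift e to Nat using he0 with E
    have hAE : A < E := by exact_mod_cast hae
    have hEn : E ≤ n := by
      have : e ≤ (n : Int) := min_le_right _ _
      omega
    have hbL : ∀ i : Nat, i < (nlOf LS).length →
        PySem.List.pyGetD (nlOf LS) ((i : Nat) : Int) 0 = (preLen LS (i + 1) : Int) - 1 := by
      intro i hi
      rw [PySem.List.pyGetD_eq_getElem _ _ (by exact_mod_cast Nat.zero_le i)
        (by exact_mod_cast hi)]
      simp [nlOf_getElem LS i hi]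
    have hbeg : (if (A : Int) = 0 then 0 else PySem.List.pyGetD (nlOf LS) ((A : Int) - 1) 0 + 1)
        = (preLen LS A : Int) := by
      by_cases hA : A = 0
      · subst hA; simp [preLen_zero]
      · rw [if_neg (by exact_mod_cast hA)]
        rw [show (A : Int) - 1 = ((A - 1 : Nat) : Int) from by omega]
        rw [hbL (A - 1) (by rw [nlOf_length]; omega)]
        rw [show A - 1 + 1 = A from by omega]
        ring
    have hfin : (if (E : Int) = (n : Int) then ((cs.length : Nat) : Int)
          else PySem.List.pyGetD (nlOf LS) ((E : Int) - 1) 0)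
        = (preLen LS E : Int) - 1 := by
      by_cases hE : E = n
      · rw [if_pos (by exact_mod_cast hE), hE]
        have hcl : cs.length = preLen LS n - 1 := by
          rw [← hicLS, hn]; exact ic_length LS hLSne
        have hp := preLen_pos LS (k := n) hn1 hLSne
        omega
      · rw [if_neg (by exact_mod_cast hE)]
        rw [show (E : Int) - 1 = ((E - 1 : Nat) : Int) from by omega]
        rw [hbL (E - 1) (by rw [nlOf_length]; omega)]
        rw [show E - 1 + 1 = E from by omega]
    rw [hbeg, hfin]
    have hfin' : (preLen LS E : Int) - 1 = ((preLen LS E - 1 : Nat) : Int) := by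
      have := preLen_pos LS (k := E) (by omega) hLSne
      omega
    rw [hfin', PySem.List.slice_natCast]
    set MS := LS.drop A with hMS
    have hdrop : List.drop (preLen LS A) cs = ic MS := by
      rw [← hicLS]; exact ic_drop LS A (by omega)
    set k := E - A with hk
    have hk1 : 1 ≤ k := by omega
    have hMSlen : MS.length = n - A := by rw [hMS, hn]; simp
    have hMSne : MS ≠ [] := by
      intro hq; rw [hq] at hMSlen; simp at hMSlen; omega
    have hadd : preLen LS E = preLen LS A + preLen MS k := by
      have h := preLen_add LS A k
      rw [show A + k = E from by omega] at h
      exact h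
    have hpMSk : 1 ≤ preLen MS k := preLen_pos MS hk1 hMSne
    rw [show preLen LS E - 1 - preLen LS A = preLen MS k - 1 from by omega]
    rw [hdrop, ic_take MS k hk1 (by omega)]
    set W := MS.take k with hW
    have hWlen : W.length = k := by rw [hW]; simp; omega
    have hwinW : PySem.List.slice LS (some ((A : Nat) : Int)) (some ((E : Nat) : Int)) = W := by
      rw [PySem.List.slice_natCast, hW, hMS, hk]
    simp only [winMark, hwinW]
    by_cases hm : (A : Int) ≤ t - 1 ∧ t - 1 < (E : Int)
    · rw [if_pos hm]
      obtain ⟨hm1, hm2⟩ := hm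
      have h1 : 0 ≤ t - 1 - (A : Int) := by omega
      set j := (t - 1 - (A : Int)).toNat with hj
      have hjk : j < k := by omega
      have htb : (if t - 1 = 0 then 0 else PySem.List.pyGetD (nlOf LS) (t - 1 - 1) 0 + 1)
          = (preLen LS (A + j) : Int) := by
        by_cases ht0 : t - 1 = 0
        · rw [if_pos ht0]
          rw [show A + j = 0 from by omega, preLen_zero]
          simp
        · rw [if_neg ht0]
          rw [show t - 1 - 1 = ((A + j - 1 : Nat) : Int) from by omega]
          rw [hbL (A + j - 1) (by rw [nlOf_length]; omega)]
          rw [show A + j - 1 + 1 = A + j from by omega]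
          ring
      rw [htb]
      have haddj : preLen LS (A + j) = preLen LS A + preLen MS j := by
        have h := preLen_add LS A j
        rw [← hMS] at h
        exact h
      rw [show (preLen LS (A + j) : Int) - (preLen LS A : Int) = ((preLen MS j : Nat) : Int)
        from by omega]
      rw [PySem.List.slice_to_natCast, PySem.List.slice_from_natCast]
      rw [show preLen MS j = preLen W j from (preLen_take MS k j (by omega)).symm]
      rw [ic_mark W j (by rw [hWlen]; omega)]
      rw [if_pos (show (0 : Int) ≤ t - 1 - (A : Int) ∧ t - 1 - (A : Int) < (W.length : Int)
        from ⟨h1, by rw [hWlen]; omega⟩)]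
      rw [PySem.List.pySetD_of_nonneg _ _ h1]
      rw [PySem.List.pyGetD_eq_getElem _ _ h1 (by rw [hWlen]; omega)]
    · rw [if_neg hm]
      rw [if_neg (show ¬(0 ≤ t - 1 - (A : Int) ∧ t - 1 - (A : Int) < (W.length : Int)) from by
        rw [hWlen]; rintro ⟨hc1, hc2⟩; exact hm ⟨by omega, by omega⟩)]

theorem clip_code_section_spec : Claim_equal_clip_code_section := by
  intro s t r _
  show clip_code_section s t r = clip_code_section_alt s t r
  rw [A_to_win, B_to_win]
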